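-- pv_equiv track=rewrite | github.com/irmcintosh/Python | TrafficLightDetection/Triangulation/trafficLightDetect.py | process
-- ===== SOURCE A (Python) =====
-- import itertools
--
-- def process(input_list, threshold=(10, 15)):
--     combos = itertools.combinations(input_list, 2)
--     points_to_remove = [
--         point2
--         for (point1, point2) in combos
--         if abs(point1[0] - point2[0]) <= threshold[0]
--         and abs(point1[1] - point2[1]) <= threshold[1]
--     ]
--     points_to_keep = [point for point in input_list if point not in points_to_remove]
--     return points_to_keep
-- ===== SOURCE B (Python) =====
-- def process(input_list, threshold=(10, 15)):
--     tx, ty = threshold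
--     if tx < 0 or ty < 0:
--         return list(input_list)
--     cx, cy = tx + 1, ty + 1
--     grid = {}
--     removed = set()
--     for p in input_list:
--         kx, ky = p[0] // cx, p[1] // cy
--         found = False
--         for dx in (-1, 0, 1):
--             for dy in (-1, 0, 1):
--                 for q in grid.get((kx + dx, ky + dy), []):
--                     if abs(q[0] - p[0]) <= tx and abs(q[1] - p[1]) <= ty:
--                         found = True
--         if found:
--             removed.add(p)
--         grid.setdefault((kx, ky), []).append(p)
--     return [p for p in input_list if p not in removed]
-- ===== Notes on version B (the rewrite author's own statement) =====
-- stated objective: faster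
-- what changed: Replaced A's O(n^2) itertools.combinations all-pairs scan plus list-membership filter by a single pass over a spatial hash grid keyed by threshold-sized cells (checking only the 9 neighbouring cells per point) with removed values kept in a set.
import Mathlib
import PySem

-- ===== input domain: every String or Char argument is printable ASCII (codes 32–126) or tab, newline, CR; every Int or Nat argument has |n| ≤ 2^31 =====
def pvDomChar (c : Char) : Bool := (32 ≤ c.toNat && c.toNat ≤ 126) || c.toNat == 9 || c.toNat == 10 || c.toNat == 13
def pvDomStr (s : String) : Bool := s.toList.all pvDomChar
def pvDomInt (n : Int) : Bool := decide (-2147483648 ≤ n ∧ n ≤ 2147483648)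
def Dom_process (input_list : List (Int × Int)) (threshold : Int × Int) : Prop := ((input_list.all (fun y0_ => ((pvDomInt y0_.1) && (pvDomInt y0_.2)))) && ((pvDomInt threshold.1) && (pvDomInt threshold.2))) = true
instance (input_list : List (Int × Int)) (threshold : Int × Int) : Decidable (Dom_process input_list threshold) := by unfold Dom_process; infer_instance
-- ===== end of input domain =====

-- B replaces A's all-pairs scan by a spatial hash grid of threshold-sized cells
-- (plus a removed-value set), checking only the 9 neighbouring cells per point.

-- ===== PORT A =====
def pvClose (t p q : Int × Int) : Bool :=
  decide (|p.1 - q.1| ≤ t.1 ∧ |p.2 - q.2| ≤ t.2)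

def pvCombos {α : Type} : List α → List (α × α)
  | [] => []
  | x :: xs => xs.map (fun y => (x, y)) ++ pvCombos xs

def process (input_list : List (Int × Int)) (threshold : Int × Int) : List (Int × Int) :=
  let points_to_remove :=
    ((pvCombos input_list).filter (fun pq => pvClose threshold pq.1 pq.2)).map Prod.snd
  input_list.filter (fun p => !(points_to_remove.contains p))

-- ===== PORT B =====
def pvCell (c p : Int × Int) : Int × Int :=
  (PySem.Int.floordiv p.1 c.1, PySem.Int.floordiv p.2 c.2)

def pvStep (t c : Int × Int)
    (st : PySem.Dict (Int × Int) (List (Int × Int)) × PySem.Set (Int × Int))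
    (p : Int × Int) :
    PySem.Dict (Int × Int) (List (Int × Int)) × PySem.Set (Int × Int) :=
  let k := pvCell c p
  let found := [(-1 : Int), 0, 1].any fun dx => [(-1 : Int), 0, 1].any fun dy =>
    (st.1.getD (k.1 + dx, k.2 + dy) []).any fun q => pvClose t q p
  let removed := if found then st.2.add p else st.2
  (st.1.insert k (st.1.getD k [] ++ [p]), removed)

def process_alt (input_list : List (Int × Int)) (threshold : Int × Int) : List (Int × Int) :=
  if threshold.1 < 0 ∨ threshold.2 < 0 then input_list
  else
    let st := input_list.foldl (pvStep threshold (threshold.1 + 1, threshold.2 + 1))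
      (PySem.Dict.empty, PySem.Set.empty)
    input_list.filter fun p => !(PySem.Set.contains st.2 p)

-- ===== PRECONDITION & SPEC =====
def Spec_process (input_list : List (Int × Int)) (threshold : Int × Int) (out : List (Int × Int)) : Prop := out = process_alt input_list threshold
instance (input_list : List (Int × Int)) (threshold : Int × Int) (out : List (Int × Int)) : Decidable (Spec_process input_list threshold out) := by unfold Spec_process; infer_instance

-- ===== CLAIM (what is proved, stated in full; the proofs are below) =====
def Claim_equal_process : Prop := ∀ (input_list : List (Int × Int)) (threshold : Int × Int), Dom_process input_list threshold → Spec_process input_list threshold (process input_list threshold)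

-- ===== LEMMAS AND PROOFS =====

-- z is removed from list s: some occurrence of z has an earlier close point.
def RemP (t : Int × Int) (s : List (Int × Int)) (z : Int × Int) : Prop :=
  ∃ u v, s = u ++ z :: v ∧ ∃ w ∈ u, pvClose t w z = true

lemma remP_nil (t : Int × Int) (z : Int × Int) : ¬ RemP t [] z := by
  rintro ⟨u, v, h, -⟩
  exact absurd h (by simp)

lemma remP_cons (t : Int × Int) (x : Int × Int) (xs : List (Int × Int)) (z : Int × Int) :
    RemP t (x :: xs) z ↔ (z ∈ xs ∧ pvClose t x z = true) ∨ RemP t xs z := by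
  constructor
  · rintro ⟨u, v, h, w, hw, hc⟩
    cases u with
    | nil => simp at hw
    | cons a u' =>
      simp only [List.cons_append, List.cons.injEq] at h
      obtain ⟨rfl, h2⟩ := h
      rcases List.mem_cons.mp hw with rfl | hw'
      · exact Or.inl ⟨h2 ▸ (by simp), hc⟩
      · exact Or.inr ⟨u', v, h2, w, hw', hc⟩
  · rintro (⟨hz, hc⟩ | ⟨u, v, h, w, hw, hc⟩)
    · obtain ⟨u', v', rfl⟩ := List.append_of_mem hz
      exact ⟨x :: u', v', by simp, x, by simp, hc⟩
    · exact ⟨x :: u, v, by simp [h], w, by simp [hw], hc⟩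

lemma remP_append_singleton (t : Int × Int) (s : List (Int × Int)) (p z : Int × Int) :
    RemP t (s ++ [p]) z ↔ RemP t s z ∨ (z = p ∧ ∃ w ∈ s, pvClose t w z = true) := by
  induction s with
  | nil =>
    simp only [List.nil_append]
    constructor
    · rintro ⟨u, v, h, w, hw, hc⟩
      cases u with
      | nil => simp at hw
      | cons a u' =>
        simp only [List.cons_append, List.cons.injEq] at h
        exact absurd h.2 (by simp)
    · rintro (h | ⟨rfl, w, hw, hc⟩)
      · exact absurd h (remP_nil t z)
      · simp at hw
  | cons x xs ih =>
    rw [List.cons_append, remP_cons, remP_cons, ih]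
    constructor
    · rintro (⟨hz, hc⟩ | h | ⟨rfl, w, hw, hc'⟩)
      · rcases List.mem_append.mp hz with h' | h'
        · exact Or.inl (Or.inl ⟨h', hc⟩)
        · simp only [List.mem_singleton] at h'
          exact Or.inr ⟨h', ⟨x, by simp, h' ▸ hc⟩⟩
      · exact Or.inl (Or.inr h)
      · exact Or.inr ⟨rfl, w, by simp [hw], hc'⟩
    · rintro ((⟨hz, hc⟩ | h) | ⟨rfl, w, hw, hc⟩)
      · exact Or.inl ⟨by simp [hz], hc⟩
      · exact Or.inr (Or.inl h)
      · rcases List.mem_cons.mp hw with rfl | hw'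
        · exact Or.inl ⟨by simp, hc⟩
        · exact Or.inr (Or.inr ⟨rfl, w, hw', hc⟩)

-- A's removal list membership is RemP.
lemma memA_iff (t : Int × Int) (l : List (Int × Int)) (z : Int × Int) :
    z ∈ ((pvCombos l).filter (fun pq => pvClose t pq.1 pq.2)).map Prod.snd ↔ RemP t l z := by
  induction l with
  | nil => simp [pvCombos, remP_nil]
  | cons x xs ih =>
    rw [remP_cons, ← ih]
    simp only [pvCombos, List.filter_append, List.map_append, List.mem_append]
    constructor
    · rintro (h | h)
      · rcases List.mem_map.mp h with ⟨pq, hpq, rfl⟩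
        rw [List.mem_filter] at hpq
        rcases List.mem_map.mp hpq.1 with ⟨y, hy, rfl⟩
        exact Or.inl ⟨hy, hpq.2⟩
      · exact Or.inr h
    · rintro (⟨hz, hc⟩ | h)
      · exact Or.inl (List.mem_map.mpr ⟨(x, z),
          List.mem_filter.mpr ⟨List.mem_map.mpr ⟨z, hz, rfl⟩, hc⟩, rfl⟩)
      · exact Or.inr h

-- geometry: coordinates within t land in adjacent cells of width t+1
lemma cell_near (t a b : Int) (ht : 0 ≤ t) (h : |a - b| ≤ t) :
    -1 ≤ PySem.Int.floordiv a (t + 1) - PySem.Int.floordiv b (t + 1) ∧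
    PySem.Int.floordiv a (t + 1) - PySem.Int.floordiv b (t + 1) ≤ 1 := by
  have hc : (0 : Int) < t + 1 := by omega
  rw [PySem.Int.floordiv_eq_ediv_of_pos hc, PySem.Int.floordiv_eq_ediv_of_pos hc]
  rw [abs_le] at h
  set c := t + 1 with hcdef
  have ha1 : c * (a / c) + a % c = a := Int.mul_ediv_add_emod a c
  have hb1 : c * (b / c) + b % c = b := Int.mul_ediv_add_emod b c
  have ha2 : 0 ≤ a % c := Int.emod_nonneg a (by omega)
  have ha3 : a % c < c := Int.emod_lt_of_pos a hc
  have hb2 : 0 ≤ b % c := Int.emod_nonneg b (by omega)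
  have hb3 : b % c < c := Int.emod_lt_of_pos b hc
  set qa := a / c
  set qb := b / c
  constructor
  · by_contra hlt
    push Not at hlt
    have h2 : c * (qa - qb) ≤ c * (-2) :=
      mul_le_mul_of_nonneg_left (by omega) (by omega)
    nlinarith [h2]
  · by_contra hlt
    push Not at hlt
    have h2 : c * 2 ≤ c * (qa - qb) :=
      mul_le_mul_of_nonneg_left (by omega) (by omega)
    nlinarith [h2]

-- B's loop invariant over the processed prefix s
def PvInv (t c : Int × Int) (s : List (Int × Int))
    (st : PySem.Dict (Int × Int) (List (Int × Int)) × PySem.Set (Int × Int)) : Prop :=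
  (∀ k q, q ∈ st.1.getD k [] → q ∈ s ∧ pvCell c q = k) ∧
  (∀ q ∈ s, q ∈ st.1.getD (pvCell c q) []) ∧
  (∀ z, z ∈ st.2 ↔ RemP t s z)

lemma pvInv_init (t c : Int × Int) :
    PvInv t c [] (PySem.Dict.empty, PySem.Set.empty) := by
  refine ⟨?_, ?_, ?_⟩
  · intro k q hq
    simp [PySem.Dict.getD_empty] at hq
  · intro q hq; simp at hq
  · intro z
    simp [PySem.Set.empty, remP_nil]

lemma found_iff (t : Int × Int) (ht1 : 0 ≤ t.1) (ht2 : 0 ≤ t.2)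
    (s : List (Int × Int))
    (st : PySem.Dict (Int × Int) (List (Int × Int)) × PySem.Set (Int × Int))
    (h1 : ∀ k q, q ∈ st.1.getD k [] → q ∈ s ∧ pvCell (t.1 + 1, t.2 + 1) q = k)
    (h2 : ∀ q ∈ s, q ∈ st.1.getD (pvCell (t.1 + 1, t.2 + 1) q) [])
    (p : Int × Int) :
    (([(-1 : Int), 0, 1].any fun dx => [(-1 : Int), 0, 1].any fun dy =>
      (st.1.getD ((pvCell (t.1 + 1, t.2 + 1) p).1 + dx, (pvCell (t.1 + 1, t.2 + 1) p).2 + dy) []).any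
        fun q => pvClose t q p) = true)
    ↔ ∃ q ∈ s, pvClose t q p = true := by
  simp only [List.any_eq_true]
  constructor
  · rintro ⟨dx, -, dy, -, q, hq, hc⟩
    exact ⟨q, (h1 _ q hq).1, hc⟩
  · rintro ⟨q, hqs, hc⟩
    have hq := h2 q hqs
    have hcl := hc
    simp only [pvClose, decide_eq_true_eq] at hc
    have g1 := cell_near t.1 q.1 p.1 ht1 hc.1
    have g2 := cell_near t.2 q.2 p.2 ht2 hc.2
    refine ⟨(pvCell (t.1 + 1, t.2 + 1) q).1 - (pvCell (t.1 + 1, t.2 + 1) p).1, ?_,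
            (pvCell (t.1 + 1, t.2 + 1) q).2 - (pvCell (t.1 + 1, t.2 + 1) p).2, ?_,
            q, ?_, hcl⟩
    · simp only [pvCell, List.mem_cons, List.mem_singleton] at g1 ⊢
      omega
    · simp only [pvCell, List.mem_cons, List.mem_singleton] at g2 ⊢
      omega
    · have hk : ((pvCell (t.1 + 1, t.2 + 1) p).1 +
          ((pvCell (t.1 + 1, t.2 + 1) q).1 - (pvCell (t.1 + 1, t.2 + 1) p).1),
          (pvCell (t.1 + 1, t.2 + 1) p).2 +
          ((pvCell (t.1 + 1, t.2 + 1) q).2 - (pvCell (t.1 + 1, t.2 + 1) p).2)) =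
          pvCell (t.1 + 1, t.2 + 1) q := by
        apply Prod.ext <;> simp <;> ring
      rw [hk]
      exact hq

lemma pvInv_step (t : Int × Int) (ht1 : 0 ≤ t.1) (ht2 : 0 ≤ t.2)
    (s : List (Int × Int))
    (st : PySem.Dict (Int × Int) (List (Int × Int)) × PySem.Set (Int × Int))
    (p : Int × Int)
    (h : PvInv t (t.1 + 1, t.2 + 1) s st) :
    PvInv t (t.1 + 1, t.2 + 1) (s ++ [p]) (pvStep t (t.1 + 1, t.2 + 1) st p) := by
  obtain ⟨h1, h2, h3⟩ := h
  unfold pvStep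
  dsimp only
  refine ⟨?_, ?_, ?_⟩
  · intro k' q hq
    rw [PySem.Dict.getD_insert] at hq
    split_ifs at hq with hk
    · rcases List.mem_append.mp hq with hq' | hq'
      · obtain ⟨hs, hcell⟩ := h1 _ q hq'
        exact ⟨List.mem_append_left _ hs, hcell.trans hk.symm⟩
      · simp only [List.mem_singleton] at hq'
        subst hq'
        exact ⟨List.mem_append_right _ (by simp), hk.symm⟩
    · obtain ⟨hs, hcell⟩ := h1 _ q hq
      exact ⟨List.mem_append_left _ hs, hcell⟩
  · intro q hq
    rw [PySem.Dict.getD_insert]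
    rcases List.mem_append.mp hq with hq' | hq'
    · have hb := h2 q hq'
      split_ifs with hk
      · rw [hk] at hb
        exact List.mem_append_left _ hb
      · exact hb
    · simp only [List.mem_singleton] at hq'
      subst hq'
      rw [if_pos rfl]
      exact List.mem_append_right _ (by simp)
  · intro z
    have hfi := found_iff t ht1 ht2 s st h1 h2 p
    split_ifs with hf
    · rw [PySem.Set.mem_add, h3, remP_append_singleton]
      obtain ⟨q, hqs, hqc⟩ := hfi.mp hf
      constructor
      · rintro (h | rfl)
        · exact Or.inl h
        · exact Or.inr ⟨rfl, q, hqs, hqc⟩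
      · rintro (h | ⟨rfl, -⟩)
        · exact Or.inl h
        · exact Or.inr rfl
    · rw [h3, remP_append_singleton]
      constructor
      · exact Or.inl
      · rintro (h | ⟨rfl, w, hw, hc⟩)
        · exact h
        · exact absurd (hfi.mpr ⟨w, hw, hc⟩) hf

lemma pvInv_foldl (t : Int × Int) (ht1 : 0 ≤ t.1) (ht2 : 0 ≤ t.2)
    (l : List (Int × Int)) :
    ∀ (s : List (Int × Int)) st, PvInv t (t.1 + 1, t.2 + 1) s st →
      PvInv t (t.1 + 1, t.2 + 1) (s ++ l) (l.foldl (pvStep t (t.1 + 1, t.2 + 1)) st) := by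
  induction l with
  | nil => intro s st h; simpa using h
  | cons x xs ih =>
    intro s st h
    have h' := pvInv_step t ht1 ht2 s st x h
    have := ih (s ++ [x]) _ h'
    simpa using this

-- ===== VERDICT (by name: the statement is the Claim_ definition above) =====
theorem process_spec : Claim_equal_process := by
  intro l t _
  unfold Spec_process process process_alt
  by_cases hneg : t.1 < 0 ∨ t.2 < 0
  · rw [if_pos hneg]
    have hempty : (pvCombos l).filter (fun pq => pvClose t pq.1 pq.2) = [] := by
      apply List.filter_eq_nil_iff.mpr
      intro pq _
      simp only [pvClose, decide_eq_true_eq]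
      rintro ⟨ha, hb⟩
      rcases hneg with h | h
      · have := abs_nonneg (pq.1.1 - pq.2.1); omega
      · have := abs_nonneg (pq.1.2 - pq.2.2); omega
    rw [hempty]
    simp
  · rw [if_neg hneg]
    push Not at hneg
    have hinv := pvInv_foldl t hneg.1 hneg.2 l [] (PySem.Dict.empty, PySem.Set.empty)
      (pvInv_init t _)
    simp only [List.nil_append] at hinv
    apply List.filter_congr
    intro p _
    congr 1
    rw [Bool.eq_iff_iff]
    simp only [List.contains_iff_mem, PySem.Set.contains_iff]
    rw [memA_iff]
    exact (hinv.2.2 p).symm
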